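-- pv_equiv track=rewrite | github.com/mrkirthi-24/dexter-reviews | review_demo.py | group_consecutive_lines
-- ===== SOURCE A (Python) =====
-- from typing import Dict, Set, List, Tuple
--
-- def group_consecutive_lines(lines: List[int], gap: int = 5) -> List[List[int]]:
--     """Group consecutive lines into chunks (within 'gap' lines of each other)."""
--     if not lines:
--         return []
--     sorted_lines = sorted(lines)
--     chunks = [[sorted_lines[0]]]
--     for ln in sorted_lines[1:]:
--         if ln - chunks[-1][-1] <= gap:
--             chunks[-1].append(ln)
--         else:
--             chunks.append([ln])
--     return chunks
-- ===== SOURCE B (Python) =====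
-- def group_consecutive_lines(lines, gap=5):
--     """Group consecutive lines into chunks (within 'gap' lines of each other):
--     staged passes — sort, list the break positions, then slice between them."""
--     s = sorted(lines)
--     if not s:
--         return []
--     breaks = [i for i in range(1, len(s)) if s[i] - s[i - 1] > gap]
--     bounds = [0] + breaks + [len(s)]
--     return [s[a:b] for a, b in zip(bounds, bounds[1:])]
-- ===== Notes on version B (the rewrite author's own statement) =====
-- stated objective: alternative
-- what changed: B replaces A's single accumulate-into-last-chunk loop by staged passes: after sorting it first collects the break positions (indices where the consecutive difference exceeds gap) with a comprehension, then slices the sorted list between consecutive boundaries via zip.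
import Mathlib
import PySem

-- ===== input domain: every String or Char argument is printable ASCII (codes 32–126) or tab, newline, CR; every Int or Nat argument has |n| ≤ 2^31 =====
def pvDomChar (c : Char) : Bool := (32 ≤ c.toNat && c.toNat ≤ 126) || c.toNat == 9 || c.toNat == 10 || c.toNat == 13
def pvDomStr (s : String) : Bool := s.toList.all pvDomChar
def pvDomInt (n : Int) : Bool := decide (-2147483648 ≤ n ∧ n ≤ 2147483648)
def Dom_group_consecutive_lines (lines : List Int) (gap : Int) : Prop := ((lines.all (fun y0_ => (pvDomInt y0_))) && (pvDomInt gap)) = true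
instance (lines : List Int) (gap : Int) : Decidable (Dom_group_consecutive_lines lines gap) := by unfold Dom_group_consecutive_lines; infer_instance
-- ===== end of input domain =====

-- B groups by staged passes instead of A's accumulate-into-last-chunk loop: it sorts, collects the
-- break positions in one comprehension, then slices the sorted list between consecutive boundaries
-- (objective: alternative; return values proved equal; same O(n log n)).

-- ===== PORT A =====
-- loop body of A: chunks is never empty and its last chunk is never empty (it starts as
-- [[sorted_lines[0]]] and every branch keeps that), so the `none`/getD fallbacks are unreachable
def stepA (gap : Int) (chunks : List (List Int)) (ln : Int) : List (List Int) :=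
  match chunks.getLast? with
  | none => chunks
  | some last =>
    if ln - (last.getLast?.getD 0) ≤ gap then chunks.dropLast ++ [last ++ [ln]]
    else chunks ++ [[ln]]

def group_consecutive_lines (lines : List Int) (gap : Int) : List (List Int) :=
  if lines = [] then []
  else
    match PySem.List.sorted lines (fun x => x) false with
    | [] => []  -- unreachable: sorted of a nonempty list is nonempty
    | x :: xs => xs.foldl (stepA gap) [[x]]

-- ===== PORT B =====
-- from Source B: s = sorted(lines); breaks = [i for i in range(1, len(s)) if s[i]-s[i-1] > gap];
-- bounds = [0]+breaks+[len(s)]; return [s[a:b] for a, b in zip(bounds, bounds[1:])]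
-- (s[i] with i in range(1, len(s)) is always in range, so pyGetD's default is unreachable)
def group_consecutive_lines_alt (lines : List Int) (gap : Int) : List (List Int) :=
  let s := PySem.List.sorted lines (fun x => x) false
  if s = [] then []
  else
    let breaks := (PySem.List.pyRange 1 (s.length : Int) 1).filter
      (fun i => decide (gap < PySem.List.pyGetD s i 0 - PySem.List.pyGetD s (i - 1) 0))
    let bounds := 0 :: (breaks ++ [(s.length : Int)])
    ((bounds.zip (PySem.List.slice bounds (some 1) none)).map
      (fun p => PySem.List.slice s (some p.1) (some p.2)))

-- ===== PRECONDITION & SPEC =====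
def Spec_group_consecutive_lines (lines : List Int) (gap : Int) (out : List (List Int)) : Prop := out = group_consecutive_lines_alt lines gap
instance (lines : List Int) (gap : Int) (out : List (List Int)) : Decidable (Spec_group_consecutive_lines lines gap out) := by unfold Spec_group_consecutive_lines; infer_instance

-- ===== CLAIM (what is proved, stated in full; the proofs are below) =====
def Claim_equal_group_consecutive_lines : Prop := ∀ (lines : List Int) (gap : Int), Dom_group_consecutive_lines lines gap → Spec_group_consecutive_lines lines gap (group_consecutive_lines lines gap)

-- ===== LEMMAS AND PROOFS =====

-- splitRun gap p xs = (maximal prefix of xs continuing an ascending run ending at p, remainder)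
def splitRun (gap p : Int) : List Int → List Int × List Int
  | [] => ([], [])
  | x :: xs => if x - p ≤ gap then (x :: (splitRun gap x xs).1, (splitRun gap x xs).2) else ([], x :: xs)

theorem splitRun_rest_length (gap p : Int) (xs : List Int) : (splitRun gap p xs).2.length ≤ xs.length := by
  induction xs generalizing p with
  | nil => simp [splitRun]
  | cons x xs ih =>
    by_cases h : x - p ≤ gap
    · simp only [splitRun, if_pos h]; exact Nat.le_succ_of_le (ih x)
    · simp [splitRun, h]

-- runs gap xs : the grouping of xs (read left to right) into maximal runs
def runs (gap : Int) : List Int → List (List Int)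
  | [] => []
  | x :: xs => (x :: (splitRun gap x xs).1) :: runs gap (splitRun gap x xs).2
termination_by l => l.length
decreasing_by
  simp only [List.length_cons]
  exact Nat.lt_succ_of_le (splitRun_rest_length gap x xs)

-- ===== A's fold computes `runs` =====
theorem foldA_inv (gap : Int) (xs : List Int) : ∀ (acc : List (List Int)) (c : List Int) (p : Int),
    List.foldl (stepA gap) (acc ++ [c ++ [p]]) xs
      = acc ++ (c ++ [p] ++ (splitRun gap p xs).1) :: runs gap (splitRun gap p xs).2 := by
  induction xs with
  | nil => intro acc c p; simp [splitRun, runs]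
  | cons x xs ih =>
    intro acc c p
    have hstep : stepA gap (acc ++ [c ++ [p]]) x
        = if x - p ≤ gap then acc ++ [(c ++ [p]) ++ [x]] else (acc ++ [c ++ [p]]) ++ [[x]] := by
      simp [stepA]
    by_cases h : x - p ≤ gap
    · rw [List.foldl_cons, hstep, if_pos h, ih acc (c ++ [p]) x]
      simp [splitRun, h]
    · rw [List.foldl_cons, hstep, if_neg h]
      have := ih (acc ++ [c ++ [p]]) [] x
      simp only [List.nil_append] at this
      rw [this]
      simp [splitRun, runs, h]

theorem A_eq (lines : List Int) (gap : Int) :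
    group_consecutive_lines lines gap = runs gap (PySem.List.sorted lines (fun x => x) false) := by
  by_cases hl : lines = []
  · subst hl
    have h0 : PySem.List.sorted ([] : List Int) (fun x => x) false = [] :=
      (PySem.List.sorted_eq_nil_iff _ _ _).mpr rfl
    simp [group_consecutive_lines, h0, runs]
  · unfold group_consecutive_lines
    rw [if_neg hl]
    cases hs : PySem.List.sorted lines (fun x => x) false with
    | nil => exact absurd ((PySem.List.sorted_eq_nil_iff _ _ _).mp hs) hl
    | cons x xs =>
      show List.foldl (stepA gap) [[x]] xs = runs gap (x :: xs)
      have := foldA_inv gap xs [] [] x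
      simp only [List.nil_append] at this
      rw [this]
      simp [runs]

-- ===== structure of splitRun =====
theorem splitRun_decomp (gap p : Int) (xs : List Int) :
    (splitRun gap p xs).1 ++ (splitRun gap p xs).2 = xs := by
  induction xs generalizing p with
  | nil => simp [splitRun]
  | cons x xs ih =>
    by_cases h : x - p ≤ gap
    · simp [splitRun, h, ih x]
    · simp [splitRun, h]

theorem splitRun_run_chain (gap p : Int) (xs : List Int) :
    List.IsChain (fun a b => b - a ≤ gap) (p :: (splitRun gap p xs).1) := by
  induction xs generalizing p with
  | nil => simp [splitRun]
  | cons x xs ih =>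
    by_cases h : x - p ≤ gap
    · simp only [splitRun, if_pos h]
      exact List.isChain_cons_cons.mpr ⟨h, ih x⟩
    · simp [splitRun, h]

theorem splitRun_break (gap p : Int) (xs : List Int) :
    ∀ z zs, (splitRun gap p xs).2 = z :: zs →
      ¬ (z - (p :: (splitRun gap p xs).1).getLast?.getD 0 ≤ gap) := by
  induction xs generalizing p with
  | nil => intro z zs h; simp [splitRun] at h
  | cons x xs ih =>
    intro z zs h
    by_cases hx : x - p ≤ gap
    · simp only [splitRun, if_pos hx] at h ⊢
      have := ih x z zs h
      simpa [List.getLast?_cons_cons] using this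
    · simp only [splitRun, if_neg hx] at h ⊢
      obtain ⟨rfl, rfl⟩ := by simpa using h
      simpa using hx

-- ===== B's staged view: break positions and slicing between them =====

-- break positions minus one: k with s[k+1] - s[k] > gap
def breaksN (gap : Int) (s : List Int) : List Nat :=
  (List.range (s.length - 1)).filter (fun k => decide (gap < s.getD (k+1) 0 - s.getD k 0))

-- chop s prev ks: the slices [prev, k₁+1), [k₁+1, k₂+1), …, [last+1, end)
def chopAt (s : List Int) (prev : Nat) : List Nat → List (List Int)
  | [] => [s.drop prev]
  | k :: ks => (s.drop prev).take (k + 1 - prev) :: chopAt s (k + 1) ks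

-- the zip-of-bounds comprehension in B is exactly chopAt
theorem zip_chop (s : List Int) : ∀ (ks : List Nat) (prev : Nat),
    (((prev : Int) :: (ks.map (fun (k : Nat) => 1 + (k : Int)) ++ [(s.length : Int)])).zip
        (ks.map (fun (k : Nat) => 1 + (k : Int)) ++ [(s.length : Int)])).map
      (fun p => PySem.List.slice s (some p.1) (some p.2))
      = chopAt s prev ks := by
  intro ks
  induction ks with
  | nil =>
    intro prev
    simp only [List.map_nil, List.nil_append, List.zip_cons_cons, List.zip_nil_right,
      List.map_cons, chopAt]
    rw [PySem.List.slice_natCast]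
    congr 1
    exact List.take_of_length_le (by simp)
  | cons k ks ih =>
    intro prev
    have hk : (1 + (k : Int)) = ((k + 1 : Nat) : Int) := by push_cast; ring
    simp only [List.map_cons, List.cons_append, List.zip_cons_cons, chopAt]
    congr 1
    · rw [hk, PySem.List.slice_natCast]
    · rw [hk]
      exact ih (k + 1)

-- chopAt ignores a common prefix when all positions are shifted past it
theorem chopAt_shift (u rest : List Int) : ∀ (ks : List Nat) (prev : Nat),
    chopAt (u ++ rest) (u.length + prev) (ks.map (u.length + ·)) = chopAt rest prev ks := by
  intro ks
  induction ks with
  | nil => intro prev; simp [chopAt, List.drop_length_add_append]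
  | cons k ks ih =>
    intro prev
    simp only [List.map_cons, chopAt]
    congr 1
    · rw [List.drop_length_add_append]
      congr 1
      omega
    · rw [show u.length + k + 1 = u.length + (k + 1) by omega, ih (k + 1)]

-- breaksN of a tight chunk followed by a break decomposes
theorem breaksN_decomp (gap : Int) (u rest : List Int) (hu : u ≠ [])
    (hchain : ∀ k, k + 1 < u.length → u.getD (k+1) 0 - u.getD k 0 ≤ gap)
    (hbreak : ∀ z zs, rest = z :: zs → gap < z - u.getD (u.length - 1) 0) :
    breaksN gap (u ++ rest)
      = if rest = [] then [] else (u.length - 1) :: (breaksN gap rest).map (u.length + ·) := by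
  have hm : 1 ≤ u.length := List.length_pos_iff.mpr hu
  cases rest with
  | nil =>
    rw [if_pos rfl]
    unfold breaksN
    rw [List.append_nil, List.filter_eq_nil_iff]
    intro k hk
    simp only [List.mem_range] at hk
    simp only [decide_eq_true_eq, not_lt]
    exact hchain k (by omega)
  | cons z zs =>
    rw [if_neg (by simp)]
    unfold breaksN
    have hlen : (u ++ z :: zs).length - 1 = u.length + ((z :: zs).length - 1) := by
      simp only [List.length_append, List.length_cons]
      omega
    have hsplit : u.length = (u.length - 1) + 1 := by omega
    have hfirst : (List.range u.length).filter
        (fun k => decide (gap < (u ++ z :: zs).getD (k+1) 0 - (u ++ z :: zs).getD k 0))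
        = [u.length - 1] := by
      conv_lhs => rw [hsplit, List.range_succ]
      rw [List.filter_append]
      have h1 : (List.range (u.length - 1)).filter
          (fun k => decide (gap < (u ++ z :: zs).getD (k+1) 0 - (u ++ z :: zs).getD k 0)) = [] := by
        rw [List.filter_eq_nil_iff]
        intro k hk
        simp only [List.mem_range] at hk
        rw [List.getD_append u (z :: zs) 0 (k+1) (by omega),
          List.getD_append u (z :: zs) 0 k (by omega)]
        simp only [decide_eq_true_eq, not_lt]
        exact hchain k (by omega)
      have h2 : ((u ++ z :: zs).getD (u.length - 1 + 1) 0) = z := by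
        rw [show u.length - 1 + 1 = u.length by omega,
          List.getD_append_right u (z :: zs) 0 u.length (le_refl _), Nat.sub_self]
        rfl
      have h3 : ((u ++ z :: zs).getD (u.length - 1) 0) = u.getD (u.length - 1) 0 :=
        List.getD_append u (z :: zs) 0 (u.length - 1) (by omega)
      have hd : decide (gap < (u ++ z :: zs).getD (u.length - 1 + 1) 0
          - (u ++ z :: zs).getD (u.length - 1) 0) = true := by
        simp only [decide_eq_true_eq]
        rw [h2, h3]
        exact hbreak z zs rfl
      rw [h1, List.nil_append, List.filter_singleton, hd]
      rfl
    have g1 : ∀ j : Nat, (u ++ z :: zs).getD (u.length + j + 1) 0 = (z :: zs).getD (j + 1) 0 := by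
      intro j
      rw [show u.length + j + 1 = u.length + (j + 1) by omega,
        List.getD_append_right u (z :: zs) 0 _ (by omega)]
      congr 1
      omega
    have g2 : ∀ j : Nat, (u ++ z :: zs).getD (u.length + j) 0 = (z :: zs).getD j 0 := by
      intro j
      rw [List.getD_append_right u (z :: zs) 0 _ (by omega)]
      congr 1
      omega
    have htail : (List.range ((z :: zs).length - 1)).filter
        ((fun k => decide (gap < (u ++ z :: zs).getD (k+1) 0 - (u ++ z :: zs).getD k 0))
          ∘ (fun x => u.length + x))
        = (List.range ((z :: zs).length - 1)).filter
          (fun k => decide (gap < (z :: zs).getD (k+1) 0 - (z :: zs).getD k 0)) := by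
      apply List.filter_congr
      intro j _
      simp only [Function.comp]
      rw [g1 j, g2 j]
    rw [hlen, List.range_add, List.filter_append, List.filter_map, hfirst, htail,
      List.singleton_append]

-- the chain property of splitRun, in indexed (getD) form
theorem chain_getD (gap : Int) (u : List Int)
    (h : List.IsChain (fun a b => b - a ≤ gap) u) :
    ∀ k, k + 1 < u.length → u.getD (k+1) 0 - u.getD k 0 ≤ gap := by
  intro k hk
  rw [List.getD_eq_getElem?_getD, List.getD_eq_getElem?_getD,
    List.getElem?_eq_getElem hk, List.getElem?_eq_getElem (by omega)]
  exact (List.isChain_iff_getElem.mp h) k hk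

-- main: slicing at the break positions is exactly the maximal-run grouping
theorem chop_runs (gap : Int) : ∀ (n : Nat) (s : List Int), s.length ≤ n → s ≠ [] →
    chopAt s 0 (breaksN gap s) = runs gap s := by
  intro n
  induction n with
  | zero =>
    intro s hs hne
    exact absurd (List.eq_nil_of_length_eq_zero (Nat.le_zero.mp hs)) hne
  | succ n ih =>
    intro s hs hne
    cases s with
    | nil => exact absurd rfl hne
    | cons x xs =>
      have hruns : runs gap (x :: xs)
          = (x :: (splitRun gap x xs).1) :: runs gap (splitRun gap x xs).2 := by
        conv_lhs => rw [runs]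
      have hchain := chain_getD gap _ (splitRun_run_chain gap x xs)
      cases hcase : (splitRun gap x xs).2 with
      | nil =>
        have hdec : (x :: (splitRun gap x xs).1) = x :: xs := by
          have h := splitRun_decomp gap x xs
          rw [hcase, List.append_nil] at h
          rw [h]
        have hb0 : breaksN gap (x :: xs) = [] := by
          have := breaksN_decomp gap (x :: (splitRun gap x xs).1) [] (by simp) hchain
            (by intro z zs h; cases h)
          rw [if_pos rfl] at this
          rw [← hdec]
          simpa using this
        rw [hb0, chopAt, hruns, hcase]
        simp [runs, hdec]
      | cons z zs =>
        have hdec : (x :: (splitRun gap x xs).1) ++ z :: zs = x :: xs := by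
          have h := splitRun_decomp gap x xs
          rw [hcase] at h
          simpa using h
        have hbreak : ∀ w ws, (z :: zs : List Int) = w :: ws →
            gap < w - (x :: (splitRun gap x xs).1).getD
              ((x :: (splitRun gap x xs).1).length - 1) 0 := by
          intro w ws hw
          injection hw with hw1 hw2
          subst hw1
          subst hw2
          have h1 := splitRun_break gap x xs z zs hcase
          have h2 : (x :: (splitRun gap x xs).1).getLast?.getD 0
              = (x :: (splitRun gap x xs).1).getD
                ((x :: (splitRun gap x xs).1).length - 1) 0 := by
            rw [List.getLast?_eq_getElem?, List.getD_eq_getElem?_getD]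
          rw [← h2]
          omega
        have hbn := breaksN_decomp gap (x :: (splitRun gap x xs).1) (z :: zs) (by simp)
          hchain hbreak
        rw [if_neg (by simp)] at hbn
        have hrlen : (z :: zs).length ≤ n := by
          have h1 := splitRun_rest_length gap x xs
          rw [hcase] at h1
          simp only [List.length_cons] at hs
          omega
        rw [hruns, hcase, ← hdec, hbn, chopAt]
        congr 1
        · rw [List.drop_zero, Nat.sub_zero,
            show (x :: (splitRun gap x xs).1).length - 1 + 1
              = (x :: (splitRun gap x xs).1).length by simp]
          exact List.take_left' rfl
        · rw [show (x :: (splitRun gap x xs).1).length - 1 + 1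
              = (x :: (splitRun gap x xs).1).length + 0 by simp]
          rw [chopAt_shift (x :: (splitRun gap x xs).1) (z :: zs) (breaksN gap (z :: zs)) 0]
          exact ih (z :: zs) hrlen (by simp)

-- B computes chopAt at the breaks of the sorted list
theorem B_eq (lines : List Int) (gap : Int) :
    group_consecutive_lines_alt lines gap
      = if PySem.List.sorted lines (fun x => x) false = [] then []
        else chopAt (PySem.List.sorted lines (fun x => x) false) 0
          (breaksN gap (PySem.List.sorted lines (fun x => x) false)) := by
  unfold group_consecutive_lines_alt
  dsimp only
  by_cases hs : PySem.List.sorted lines (fun x => x) false = []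
  · simp [hs]
  · rw [if_neg hs, if_neg hs]
    set s := PySem.List.sorted lines (fun x => x) false with hsdef
    have hn : ((s.length : Int) - 1).toNat = s.length - 1 := by omega
    have hfilter : (PySem.List.pyRange 1 (s.length : Int) 1).filter
        (fun i => decide (gap < PySem.List.pyGetD s i 0 - PySem.List.pyGetD s (i - 1) 0))
        = (breaksN gap s).map (fun (k : Nat) => 1 + (k : Int)) := by
      rw [PySem.List.pyRange_one, List.filter_map, hn]
      unfold breaksN
      congr 1
      apply List.filter_congr
      intro k _
      simp only [Function.comp]
      have h1 : (1 : Int) + (k : Int) = ((k + 1 : Nat) : Int) := by push_cast; ring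
      have h3 : ((k + 1 : Nat) : Int) - 1 = ((k : Nat) : Int) := by omega
      simp only [h1, h3, PySem.List.pyGetD_natCast]
    rw [hfilter, PySem.List.slice_from_one, List.tail_cons]
    have := zip_chop s (breaksN gap s) 0
    simpa using this

-- ===== VERDICT (by name: the statement is the Claim_ definition above) =====
theorem group_consecutive_lines_spec : Claim_equal_group_consecutive_lines := by
  intro lines gap _
  unfold Spec_group_consecutive_lines
  rw [A_eq, B_eq]
  by_cases hs : PySem.List.sorted lines (fun x => x) false = []
  · simp [hs, runs]
  · rw [if_neg hs,
      chop_runs gap (PySem.List.sorted lines (fun x => x) false).length _ (le_refl _) hs]
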